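-- pv_equiv track=rewrite | github.com/cs0317/stagehand | auto_verbs/verbs/convert_clicks.py | find_template_literal_end
-- ===== SOURCE A (Python) =====
-- def find_template_literal_end(content, start_pos):
--     """
--     Find the end of a JS template literal starting from the backtick at start_pos.
--     Handles ${...} expressions (with nested braces) and \\` escapes.
--     Returns the position of the closing backtick, or -1 if not found.
--     """
--     pos = start_pos + 1
--     brace_depth = 0
--
--     while pos < len(content):
--         ch = content[pos]
--
--         # Handle escape sequences
--         if ch == '\\':
--             pos += 2
--             continue
--
--         # Inside ${...} expression
--         if brace_depth > 0:
--             if ch == '{':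
--                 brace_depth += 1
--             elif ch == '}':
--                 brace_depth -= 1
--             pos += 1
--             continue
--
--         # Start of ${...} expression
--         if ch == '$' and pos + 1 < len(content) and content[pos + 1] == '{':
--             brace_depth = 1
--             pos += 2
--             continue
--
--         # Found closing backtick
--         if ch == '`':
--             return pos
--
--         pos += 1
--
--     return -1
-- ===== SOURCE B (Python) =====
-- def find_template_literal_end(content, start_pos):
--     """Recursive-descent variant: a helper consumes each ${...} expression by
--     matching braces recursively, instead of tracking a brace_depth counter."""
--     n = len(content)
--
--     def skip_expr(pos):
--         # Consume a brace-balanced expression body; return the position just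
--         # after its closing '}' (or an end-of-string position if unclosed).
--         while pos < n:
--             ch = content[pos]
--             if ch == '\\':
--                 pos += 2
--             elif ch == '{':
--                 pos = skip_expr(pos + 1)
--             elif ch == '}':
--                 return pos + 1
--             else:
--                 pos += 1
--         return pos
--
--     pos = start_pos + 1
--     while pos < n:
--         ch = content[pos]
--         if ch == '\\':
--             pos += 2
--         elif ch == '$' and pos + 1 < n and content[pos + 1] == '{':
--             pos = skip_expr(pos + 2)
--         elif ch == '`':
--             return pos
--         else:
--             pos += 1
--     return -1
-- ===== Notes on version B (the rewrite author's own statement) =====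
-- stated objective: alternative
-- what changed: Replaces A's flat scan with a brace_depth counter by a recursive-descent helper that consumes each ${...} expression up to its matching '}', so the main loop never tracks depth.
import Mathlib
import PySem

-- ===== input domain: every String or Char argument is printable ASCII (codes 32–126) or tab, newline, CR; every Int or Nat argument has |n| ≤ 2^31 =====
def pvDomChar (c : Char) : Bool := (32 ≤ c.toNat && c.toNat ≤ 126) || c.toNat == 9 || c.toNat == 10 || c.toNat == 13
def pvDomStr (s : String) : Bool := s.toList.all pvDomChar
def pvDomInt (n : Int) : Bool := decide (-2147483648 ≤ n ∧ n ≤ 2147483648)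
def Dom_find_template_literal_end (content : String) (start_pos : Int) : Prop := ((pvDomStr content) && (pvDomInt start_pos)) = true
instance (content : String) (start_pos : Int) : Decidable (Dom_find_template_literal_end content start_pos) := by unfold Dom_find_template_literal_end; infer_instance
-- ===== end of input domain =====

-- B replaces A's flat scan with a brace_depth counter by a recursive helper that
-- consumes each ${...} expression up to its matching '}' (objective: alternative decomposition).

-- ===== PORT A =====
-- A's while loop: pos and brace_depth are the state; branches in A's order.
-- fuel is a totality guard only (pos grows by ≥ 1 per iteration, so
-- (len - initial pos).toNat iterations always suffice; fuel 0 means pos ≥ len, i.e. loop exit).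
-- pyGet? = none is exactly where Python raises IndexError (excluded by Pre_); -2 marks it.
def pvLoopA (cs : List Char) (fuel : Nat) (pos depth : Int) : Int :=
  match fuel with
  | 0 => -1
  | fuel + 1 =>
    if pos < (cs.length : Int) then
      match PySem.List.pyGet? cs pos with
      | none => -2
      | some ch =>
        if ch = '\\' then pvLoopA cs fuel (pos + 2) depth
        else if depth > 0 then
          pvLoopA cs fuel (pos + 1) (if ch = '{' then depth + 1 else if ch = '}' then depth - 1 else depth)
        else if ch = '$' ∧ pos + 1 < (cs.length : Int) ∧ PySem.List.pyGet? cs (pos + 1) = some '{' then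
          pvLoopA cs fuel (pos + 2) 1
        else if ch = '`' then pos
        else pvLoopA cs fuel (pos + 1) depth
    else -1

def find_template_literal_end (content : String) (start_pos : Int) : Int :=
  pvLoopA content.toList ((content.toList.length : Int) - (start_pos + 1)).toNat (start_pos + 1) 0

-- ===== PORT B =====
-- B's skip_expr helper: consume a brace-balanced expression, return the position
-- just after its closing '}' (fuel is the same totality guard; fuel 0 means pos ≥ len).
def pvSkipExpr (cs : List Char) (fuel : Nat) (pos : Int) : Int :=
  match fuel with
  | 0 => pos
  | fuel + 1 =>
    if pos < (cs.length : Int) then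
      match PySem.List.pyGet? cs pos with
      | none => pos
      | some ch =>
        if ch = '\\' then pvSkipExpr cs fuel (pos + 2)
        else if ch = '{' then pvSkipExpr cs fuel (pvSkipExpr cs fuel (pos + 1))
        else if ch = '}' then pos + 1
        else pvSkipExpr cs fuel (pos + 1)
    else pos

-- B's main while loop (no depth counter; pyGet? = none is the IndexError case, -2 as in A's port).
def pvLoopB (cs : List Char) (fuel : Nat) (pos : Int) : Int :=
  match fuel with
  | 0 => -1
  | fuel + 1 =>
    if pos < (cs.length : Int) then
      match PySem.List.pyGet? cs pos with
      | none => -2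
      | some ch =>
        if ch = '\\' then pvLoopB cs fuel (pos + 2)
        else if ch = '$' ∧ pos + 1 < (cs.length : Int) ∧ PySem.List.pyGet? cs (pos + 1) = some '{' then
          pvLoopB cs fuel (pvSkipExpr cs fuel (pos + 2))
        else if ch = '`' then pos
        else pvLoopB cs fuel (pos + 1)
    else -1

def find_template_literal_end_alt (content : String) (start_pos : Int) : Int :=
  pvLoopB content.toList ((content.toList.length : Int) - (start_pos + 1)).toNat (start_pos + 1)

-- ===== PRECONDITION & SPEC =====
-- Pre_ excludes exactly the inputs where A raises IndexError: the first index read,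
-- start_pos + 1, is below -len(content) while the loop is entered (start_pos + 1 < len).
def Pre_find_template_literal_end (content : String) (start_pos : Int) : Prop :=
  -(content.toList.length : Int) ≤ start_pos + 1 ∨ (content.toList.length : Int) ≤ start_pos + 1
instance (content : String) (start_pos : Int) : Decidable (Pre_find_template_literal_end content start_pos) := by unfold Pre_find_template_literal_end; infer_instance

def pvWitness_find_template_literal_end : String × Int := ("`a${b}`", 0)

def Spec_find_template_literal_end (content : String) (start_pos : Int) (out : Int) : Prop := out = find_template_literal_end_alt content start_pos
instance (content : String) (start_pos : Int) (out : Int) : Decidable (Spec_find_template_literal_end content start_pos out) := by unfold Spec_find_template_literal_end; infer_instance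

-- ===== CLAIM (what is proved, stated in full; the proofs are below) =====
def Claim_equal_find_template_literal_end : Prop := ∀ (content : String) (start_pos : Int), Dom_find_template_literal_end content start_pos → Pre_find_template_literal_end content start_pos → Spec_find_template_literal_end content start_pos (find_template_literal_end content start_pos)

-- ===== LEMMAS AND PROOFS =====

-- skip_expr never moves backwards.
theorem pvSkipExpr_ge (cs : List Char) : ∀ (fuel : Nat) (pos : Int), pos ≤ pvSkipExpr cs fuel pos := by
  intro fuel
  induction fuel with
  | zero => intro pos; simp [pvSkipExpr]
  | succ g ih =>
    intro pos
    rw [pvSkipExpr]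
    by_cases h : pos < (cs.length : Int)
    · simp only [if_pos h]
      cases hg : PySem.List.pyGet? cs pos with
      | none => exact le_refl _
      | some ch =>
        by_cases h1 : ch = '\\'
        · simp only [if_pos h1]; have := ih (pos + 2); omega
        · by_cases h2 : ch = '{'
          · simp only [if_neg h1, if_pos h2]
            have a1 := ih (pos + 1)
            have a2 := ih (pvSkipExpr cs g (pos + 1))
            omega
          · by_cases h3 : ch = '}'
            · simp only [if_neg h1, if_neg h2, if_pos h3]; omega
            · simp only [if_neg h1, if_neg h2, if_neg h3]
              have := ih (pos + 1); omega
    · simp [h]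

-- With enough fuel, A's loop does not depend on the fuel either.
theorem pvLoopA_fuel (cs : List Char) : ∀ (f f' : Nat) (pos depth : Int),
    ((cs.length : Int) - pos).toNat ≤ f → ((cs.length : Int) - pos).toNat ≤ f' →
    pvLoopA cs f pos depth = pvLoopA cs f' pos depth := by
  intro f
  induction f with
  | zero =>
    intro f' pos depth hf hf'
    have h : ¬ pos < (cs.length : Int) := by omega
    cases f' with
    | zero => rfl
    | succ g' => simp [pvLoopA, h]
  | succ g ih =>
    intro f' pos depth hf hf'
    cases f' with
    | zero =>
      have h : ¬ pos < (cs.length : Int) := by omega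
      simp [pvLoopA, h]
    | succ g' =>
      rw [pvLoopA, pvLoopA]
      by_cases h : pos < (cs.length : Int)
      · simp only [if_pos h]
        cases hg : PySem.List.pyGet? cs pos with
        | none => rfl
        | some ch =>
          by_cases h1 : ch = '\\'
          · simp only [if_pos h1]; exact ih g' (pos + 2) depth (by omega) (by omega)
          · by_cases hd : depth > 0
            · simp only [if_neg h1, if_pos hd]
              exact ih g' (pos + 1) _ (by omega) (by omega)
            · by_cases h4 : ch = '$' ∧ pos + 1 < (cs.length : Int) ∧ PySem.List.pyGet? cs (pos + 1) = some '{'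
              · simp only [if_neg h1, if_neg hd, if_pos h4]
                exact ih g' (pos + 2) 1 (by omega) (by omega)
              · by_cases h5 : ch = '`'
                · simp [hd, h5]
                · simp only [if_neg h1, if_neg hd, if_neg h4, if_neg h5]
                  exact ih g' (pos + 1) depth (by omega) (by omega)
      · simp [h]

-- At depth d > 0, A's counting loop agrees with first consuming the expression via
-- skip_expr and continuing at depth d - 1.
theorem pvLoopA_skip (cs : List Char) : ∀ (f : Nat) (pos d : Int), 0 < d →
    ((cs.length : Int) - pos).toNat ≤ f →
    pvLoopA cs f pos d = pvLoopA cs f (pvSkipExpr cs f pos) (d - 1) := by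
  intro f
  induction f with
  | zero =>
    intro pos d hd hf
    simp [pvLoopA]
  | succ g ih =>
    intro pos d hd hf
    by_cases h : pos < (cs.length : Int)
    · rw [pvLoopA]
      conv_rhs => rw [pvSkipExpr]
      simp only [if_pos h]
      cases hg : PySem.List.pyGet? cs pos with
      | none =>
        rw [pvLoopA]
        simp [h, hg]
      | some ch =>
        by_cases h1 : ch = '\\'
        · simp only [if_pos h1]
          rw [ih (pos + 2) d hd (by omega)]
          exact pvLoopA_fuel cs g (g + 1) _ _
            (by have := pvSkipExpr_ge cs g (pos + 2); omega)
            (by have := pvSkipExpr_ge cs g (pos + 2); omega)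
        · simp only [if_neg h1, if_pos hd]
          by_cases h2 : ch = '{'
          · simp only [if_pos h2]
            have e1 := ih (pos + 1) (d + 1) (by omega) (by omega)
            simp only [add_sub_cancel_right] at e1
            rw [e1]
            have hr1 := pvSkipExpr_ge cs g (pos + 1)
            have e2 := ih (pvSkipExpr cs g (pos + 1)) d hd (by omega)
            rw [e2]
            have hr2 := pvSkipExpr_ge cs g (pvSkipExpr cs g (pos + 1))
            exact pvLoopA_fuel cs g (g + 1) _ _ (by omega) (by omega)
          · by_cases h3 : ch = '}'
            · simp only [if_neg h2, if_pos h3]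
              exact pvLoopA_fuel cs g (g + 1) (pos + 1) (d - 1) (by omega) (by omega)
            · simp only [if_neg h2, if_neg h3]
              rw [ih (pos + 1) d hd (by omega)]
              have hr := pvSkipExpr_ge cs g (pos + 1)
              exact pvLoopA_fuel cs g (g + 1) _ _ (by omega) (by omega)
    · have e : pvSkipExpr cs (g + 1) pos = pos := by simp [pvSkipExpr, h]
      rw [e]
      simp [pvLoopA, h]

-- At depth 0 the two main loops agree.
theorem pvLoopA_eq_loopB (cs : List Char) : ∀ (f : Nat) (pos : Int),
    ((cs.length : Int) - pos).toNat ≤ f →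
    pvLoopA cs f pos 0 = pvLoopB cs f pos := by
  intro f
  induction f with
  | zero => intro pos hf; rfl
  | succ g ih =>
    intro pos hf
    rw [pvLoopA, pvLoopB]
    by_cases h : pos < (cs.length : Int)
    · simp only [if_pos h]
      cases hg : PySem.List.pyGet? cs pos with
      | none => rfl
      | some ch =>
        by_cases h1 : ch = '\\'
        · simp only [if_pos h1]; exact ih (pos + 2) (by omega)
        · simp only [if_neg h1, lt_irrefl, if_false]
          by_cases h4 : ch = '$' ∧ pos + 1 < (cs.length : Int) ∧ PySem.List.pyGet? cs (pos + 1) = some '{'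
          · simp only [if_pos h4]
            have e1 := pvLoopA_skip cs g (pos + 2) 1 (by omega) (by omega)
            simp only [sub_self] at e1
            rw [e1]
            have hr := pvSkipExpr_ge cs g (pos + 2)
            exact ih (pvSkipExpr cs g (pos + 2)) (by omega)
          · simp only [if_neg h4]
            by_cases h5 : ch = '`'
            · simp [h5]
            · simp only [if_neg h5]
              exact ih (pos + 1) (by omega)
    · simp [h]

-- ===== VERDICT (by name: the statement is the Claim_ definition above) =====
theorem find_template_literal_end_spec : Claim_equal_find_template_literal_end := by
  intro content start_pos _ _
  unfold Spec_find_template_literal_end find_template_literal_end find_template_literal_end_alt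
  exact pvLoopA_eq_loopB _ _ _ (le_refl _)
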